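-- pv_equiv track=rewrite | github.com/nkhi/dailycodingproblem | solutions/problem282.py | contains_pythagorean_triplet
-- ===== SOURCE A (Python) =====
-- from typing import List
-- import itertools
--
-- def is_pythagorean_triplet(a: int, b: int, c: int) -> bool:
--     "Returns True if a^2 + b^2 = c^2, otherwise returns False."
--     return True if a**2 + b**2 == c **2 else False
--
-- def contains_pythagorean_triplet(arr: List[int]) -> bool:
--     """
--     Returns True if any three numbers in List arr form a valid Pythagorean Triplet,
--     otherwise returns False.
--     """
--     # Cant be a triple with 2 elements
--     if len(arr) < 3:
--         return False
--
--     # Get all permutations of the input list with 3 elements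
--     all_permutations_of_arr = list(itertools.permutations(arr, 3))
--     check = False
--
--     # Check each permuted triple using helper fxn
--     for p in all_permutations_of_arr:
--         if is_pythagorean_triplet(p[0], p[1], p[2]):
--             check = True
--             break
--
--     # If the loop is never broken, none of the perms are valid
--     return check
-- ===== SOURCE B (Python) =====
-- from typing import List
--
--
-- def contains_pythagorean_triplet(arr: List[int]) -> bool:
--     """
--     Returns True if any three numbers (at distinct positions) in arr form a
--     Pythagorean triplet a^2 + b^2 = c^2, otherwise False.
--
--     O(n^2): build a multiset (counter) of squares once, then for every
--     unordered pair check whether the sum of their squares is the square of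
--     some THIRD element (counting multiplicity, so duplicates are handled).
--     """
--     squares = [x * x for x in arr]
--     counts = {}
--     for s in squares:
--         counts[s] = counts.get(s, 0) + 1
--     n = len(arr)
--     for i in range(n):
--         for j in range(i + 1, n):
--             t = squares[i] + squares[j]
--             spare = counts.get(t, 0) - (squares[i] == t) - (squares[j] == t)
--             if spare > 0:
--                 return True
--     return False
-- ===== Notes on version B (the rewrite author's own statement) =====
-- stated objective: faster
-- what changed: Replaces the scan over all O(n^3) 3-permutations with a counter of squares built once plus an O(n^2) pair loop that checks whether a^2+b^2 is the square of some third element (multiplicity-aware).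
import Mathlib
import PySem

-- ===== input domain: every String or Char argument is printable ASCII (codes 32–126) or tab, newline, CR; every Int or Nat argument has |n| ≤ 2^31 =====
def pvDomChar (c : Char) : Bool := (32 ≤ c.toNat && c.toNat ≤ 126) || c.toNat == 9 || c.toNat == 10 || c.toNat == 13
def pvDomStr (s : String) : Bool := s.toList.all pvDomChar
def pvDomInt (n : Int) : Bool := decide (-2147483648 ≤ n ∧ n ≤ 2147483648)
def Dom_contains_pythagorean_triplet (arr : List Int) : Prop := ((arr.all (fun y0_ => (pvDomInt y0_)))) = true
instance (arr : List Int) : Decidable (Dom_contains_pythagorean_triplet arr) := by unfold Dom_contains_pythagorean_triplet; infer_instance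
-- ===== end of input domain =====

-- B replaces A's scan over all 3-permutations with a counter of squares plus a pair loop that
-- checks whether a^2+b^2 is the square of some third element; objective: faster (asymptotic).


-- ===== PORT A =====
-- is_pythagorean_triplet(a, b, c)
def pvIsPythTriple (a b c : Int) : Bool :=
  if a ^ 2 + b ^ 2 == c ^ 2 then true else false

-- the `for p in all_permutations_of_arr` loop with its break (the `check` accumulator)
def pvCheckLoop : List (List Int) → Bool
  | [] => false
  | p :: rest =>
    if pvIsPythTriple (p.getD 0 0) (p.getD 1 0) (p.getD 2 0) then true else pvCheckLoop rest

def contains_pythagorean_triplet (arr : List Int) : Bool :=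
  if arr.length < 3 then false
  else pvCheckLoop (PySem.List.permutations arr 3)

-- ===== PORT B =====
-- `counts` built by B's first loop: counts[s] = counts.get(s, 0) + 1
def pvCounter (squares : List Int) : PySem.Dict Int Int :=
  squares.foldl (fun d s => d.modify s 0 (fun v => v + 1)) ∅

-- inner `for j in range(i + 1, n)` loop with its early return
def pvInnerLoop (squares : List Int) (cnt : PySem.Dict Int Int) (i : Int) : List Int → Bool
  | [] => false
  | j :: js =>
    let t := PySem.List.pyGetD squares i 0 + PySem.List.pyGetD squares j 0
    let spare := cnt.getD t 0 - (if PySem.List.pyGetD squares i 0 == t then (1 : Int) else 0)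
      - (if PySem.List.pyGetD squares j 0 == t then (1 : Int) else 0)
    if spare > 0 then true else pvInnerLoop squares cnt i js

-- outer `for i in range(n)` loop
def pvOuterLoop (squares : List Int) (cnt : PySem.Dict Int Int) (n : Int) : List Int → Bool
  | [] => false
  | i :: is =>
    if pvInnerLoop squares cnt i (PySem.List.pyRange (i + 1) n 1) then true
    else pvOuterLoop squares cnt n is

def contains_pythagorean_triplet_alt (arr : List Int) : Bool :=
  let squares := arr.map (fun x => x * x)
  let cnt := pvCounter squares
  pvOuterLoop squares cnt (arr.length : Int) (PySem.List.pyRange 0 (arr.length : Int) 1)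

-- ===== PRECONDITION & SPEC =====
def Spec_contains_pythagorean_triplet (arr : List Int) (out : Bool) : Prop := out = contains_pythagorean_triplet_alt arr
instance (arr : List Int) (out : Bool) : Decidable (Spec_contains_pythagorean_triplet arr out) := by unfold Spec_contains_pythagorean_triplet; infer_instance

-- ===== CLAIM (what is proved, stated in full; the proofs are below) =====
def Claim_equal_contains_pythagorean_triplet : Prop := ∀ (arr : List Int), Dom_contains_pythagorean_triplet arr → Spec_contains_pythagorean_triplet arr (contains_pythagorean_triplet arr)

-- ===== LEMMAS AND PROOFS =====

-- the common characterisation: three pairwise distinct positions whose values form a triplet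
def pvHasTriple (xs : List Int) : Prop :=
  ∃ i j k : Nat, i < xs.length ∧ j < xs.length ∧ k < xs.length ∧ i ≠ j ∧ i ≠ k ∧ j ≠ k ∧
    (xs.getD i 0) ^ 2 + (xs.getD j 0) ^ 2 = (xs.getD k 0) ^ 2

-- ---- A side: the permutation scan finds a triple iff pvHasTriple ----

theorem pvCheckLoop_any (l : List (List Int)) :
    pvCheckLoop l = l.any (fun p => pvIsPythTriple (p.getD 0 0) (p.getD 1 0) (p.getD 2 0)) := by
  induction l with
  | nil => rfl
  | cons p rest ih =>
    simp only [pvCheckLoop, List.any_cons, ih]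
    split <;> simp_all

theorem pvMem_perm_succ (xs : List Int) (r : Nat) (p : List Int) :
    p ∈ PySem.List.permutations xs (r + 1) ↔
      ∃ i : Nat, ∃ h : i < xs.length, ∃ q ∈ PySem.List.permutations (xs.eraseIdx i) r,
        p = xs[i] :: q := by
  rw [PySem.List.permutations.eq_def]
  split
  next heq => omega
  next a b heq =>
    rename_i u v
    obtain rfl : b = r := by omega
    simp only [List.mem_flatMap, List.mem_range]
    constructor
    · rintro ⟨i, hi, hp⟩
      rw [List.getElem?_eq_getElem hi] at hp
      simp only [List.mem_map] at hp
      obtain ⟨q, hq, rfl⟩ := hp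
      exact ⟨i, hi, q, hq, rfl⟩
    · rintro ⟨i, hi, q, hq, rfl⟩
      refine ⟨i, hi, ?_⟩
      rw [List.getElem?_eq_getElem hi]
      simp only [List.mem_map]
      exact ⟨q, hq, rfl⟩

theorem pvGetD_eraseIdx (xs : List Int) (i j : Nat) (hj : j < (xs.eraseIdx i).length) :
    (xs.eraseIdx i).getD j 0 = xs.getD (if j < i then j else j + 1) 0 := by
  rw [List.getD_eq_getElem _ _ hj, List.getElem_eraseIdx]
  split
  · rw [List.getD_eq_getElem]
  · rw [List.getD_eq_getElem]

theorem pvA_char (xs : List Int) (h3 : ¬ xs.length < 3) :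
    contains_pythagorean_triplet xs = true ↔
      ∃ i : Nat, ∃ _ : i < xs.length, ∃ j : Nat, ∃ _ : j < (xs.eraseIdx i).length,
        ∃ k : Nat, ∃ _ : k < ((xs.eraseIdx i).eraseIdx j).length,
          (xs.getD i 0) ^ 2 + ((xs.eraseIdx i).getD j 0) ^ 2 =
            (((xs.eraseIdx i).eraseIdx j).getD k 0) ^ 2 := by
  unfold contains_pythagorean_triplet
  rw [if_neg h3, pvCheckLoop_any, List.any_eq_true]
  constructor
  · rintro ⟨p, hp, hf⟩
    rw [show (3:Nat) = 2 + 1 from rfl, pvMem_perm_succ] at hp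
    obtain ⟨i, hi, q, hq, rfl⟩ := hp
    rw [show (2:Nat) = 1 + 1 from rfl, pvMem_perm_succ] at hq
    obtain ⟨j, hj, q2, hq2, rfl⟩ := hq
    rw [show (1:Nat) = 0 + 1 from rfl, pvMem_perm_succ] at hq2
    obtain ⟨k, hk, q3, hq3, rfl⟩ := hq2
    rw [PySem.List.permutations_zero, List.mem_singleton] at hq3
    subst hq3
    refine ⟨i, hi, j, hj, k, hk, ?_⟩
    simp only [pvIsPythTriple, List.getD_cons_zero, List.getD_cons_succ] at hf
    simp only [List.getD_eq_getElem _ _ hi, List.getD_eq_getElem _ _ hj,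
      List.getD_eq_getElem _ _ hk]
    split at hf
    · next h => exact of_decide_eq_true h
    · exact absurd hf (by simp)
  · rintro ⟨i, hi, j, hj, k, hk, heq⟩
    refine ⟨[xs[i], (xs.eraseIdx i)[j], ((xs.eraseIdx i).eraseIdx j)[k]], ?_, ?_⟩
    · rw [show (3:Nat) = 2 + 1 from rfl, pvMem_perm_succ]
      refine ⟨i, hi, _, ?_, rfl⟩
      rw [show (2:Nat) = 1 + 1 from rfl, pvMem_perm_succ]
      refine ⟨j, hj, _, ?_, rfl⟩
      rw [show (1:Nat) = 0 + 1 from rfl, pvMem_perm_succ]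
      refine ⟨k, hk, [], ?_, rfl⟩
      rw [PySem.List.permutations_zero]; simp
    · simp only [pvIsPythTriple, List.getD_cons_zero, List.getD_cons_succ]
      simp only [List.getD_eq_getElem _ _ hi, List.getD_eq_getElem _ _ hj,
        List.getD_eq_getElem _ _ hk] at heq
      simp [heq]

-- position j of xs.eraseIdx i, pushed back up / down to a position of xs
theorem pvU_lt (xs : List Int) (i j : Nat) (hi : i < xs.length) (hj : j < xs.length)
    (hne : j ≠ i) : (if j < i then j else j - 1) < (xs.eraseIdx i).length := by
  rw [List.length_eraseIdx, if_pos hi]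
  split_ifs <;> omega

theorem pvU_val (xs : List Int) (i j : Nat) (hi : i < xs.length) (hj : j < xs.length)
    (hne : j ≠ i) :
    (xs.eraseIdx i).getD (if j < i then j else j - 1) 0 = xs.getD j 0 := by
  rw [pvGetD_eraseIdx _ _ _ (pvU_lt xs i j hi hj hne)]
  congr 1
  split_ifs <;> omega

theorem pvA_iff (xs : List Int) : contains_pythagorean_triplet xs = true ↔ pvHasTriple xs := by
  by_cases h3 : xs.length < 3
  · unfold contains_pythagorean_triplet
    rw [if_pos h3]
    constructor
    · simp
    · rintro ⟨i, j, k, hi, hj, hk, hij, hik, hjk, -⟩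
      omega
  · rw [pvA_char xs h3]
    have hle1 : ∀ i, i < xs.length → (xs.eraseIdx i).length = xs.length - 1 := by
      intro i hi; rw [List.length_eraseIdx]; simp [hi]
    constructor
    · rintro ⟨i, hi, j, hj, k, hk, heq⟩
      have hlen2 : ((xs.eraseIdx i).eraseIdx j).length = (xs.eraseIdx i).length - 1 := by
        rw [List.length_eraseIdx]; simp [hj]
      rw [pvGetD_eraseIdx _ _ _ hj, pvGetD_eraseIdx _ _ _ hk,
        pvGetD_eraseIdx _ _ _ (show (if k < j then k else k + 1) < (xs.eraseIdx i).length by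
          split <;> omega)] at heq
      have h1 := hle1 i hi
      refine ⟨i, (if j < i then j else j + 1),
        (if (if k < j then k else k + 1) < i then (if k < j then k else k + 1)
          else (if k < j then k else k + 1) + 1), hi, by split_ifs <;> omega,
        by split_ifs <;> omega, by split_ifs <;> omega, by split_ifs <;> omega,
        by split_ifs <;> omega, heq⟩
    · rintro ⟨i, j, k, hi, hj, hk, hij, hik, hjk, heq⟩
      have h1 := hle1 i hi
      refine ⟨i, hi, (if j < i then j else j - 1), pvU_lt xs i j hi hj (Ne.symm hij), ?_⟩
      have hk1lt : (if k < i then k else k - 1) < (xs.eraseIdx i).length :=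
        pvU_lt xs i k hi hk (Ne.symm hik)
      have hk1j' : (if k < i then k else k - 1) ≠ (if j < i then j else j - 1) := by
        split_ifs <;> omega
      refine ⟨(if (if k < i then k else k - 1) < (if j < i then j else j - 1)
        then (if k < i then k else k - 1) else (if k < i then k else k - 1) - 1),
        pvU_lt _ _ _ (pvU_lt xs i j hi hj (Ne.symm hij)) hk1lt hk1j', ?_⟩
      rw [pvU_val xs i j hi hj (Ne.symm hij),
        pvU_val (xs.eraseIdx i) _ _ (pvU_lt xs i j hi hj (Ne.symm hij)) hk1lt hk1j',
        pvU_val xs i k hi hk (Ne.symm hik)]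
      exact heq

-- ---- B side: the counter pair scan finds a triple iff pvHasTriple ----

theorem pvInnerLoop_any (squares : List Int) (cnt : PySem.Dict Int Int) (i : Int) (js : List Int) :
    pvInnerLoop squares cnt i js = js.any (fun j =>
      let t := PySem.List.pyGetD squares i 0 + PySem.List.pyGetD squares j 0
      cnt.getD t 0 - (if PySem.List.pyGetD squares i 0 == t then (1 : Int) else 0)
        - (if PySem.List.pyGetD squares j 0 == t then (1 : Int) else 0) > 0) := by
  induction js with
  | nil => rfl
  | cons j js ih =>
    simp only [pvInnerLoop, List.any_cons, ih]
    split <;> simp_all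

theorem pvOuterLoop_any (squares : List Int) (cnt : PySem.Dict Int Int) (n : Int) (is' : List Int) :
    pvOuterLoop squares cnt n is' =
      is'.any (fun i => pvInnerLoop squares cnt i (PySem.List.pyRange (i + 1) n 1)) := by
  induction is' with
  | nil => rfl
  | cons i is' ih =>
    simp only [pvOuterLoop, List.any_cons, ih]
    split <;> simp_all

theorem pvCounter_getD (squares : List Int) (t : Int) :
    (pvCounter squares).getD t 0 = (squares.count t : Int) := by
  unfold pvCounter
  rw [PySem.Dict.getD_foldl_modify_add_one]
  show (0 : Int) + _ = _
  rw [zero_add]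

theorem pvCount_eq_sum_range (l : List Int) (t : Int) :
    l.count t = ∑ k ∈ Finset.range l.length, if l.getD k 0 = t then 1 else 0 := by
  induction l with
  | nil => simp
  | cons x xs ih =>
    rw [List.count_cons, List.length_cons, Finset.sum_range_succ']
    simp only [List.getD_cons_succ, List.getD_cons_zero]
    rw [← ih]
    rcases eq_or_ne x t with h | h <;> simp [h]

-- with positions i ≠ j fixed, the counter has a spare copy of t iff a third position holds t
theorem pvSpare_iff (sq : List Int) (t : Int) (i j : Nat) (hi : i < sq.length)
    (hj : j < sq.length) (hij : i ≠ j) :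
    ((sq.count t : Int) - (if sq.getD i 0 = t then (1 : Int) else 0)
        - (if sq.getD j 0 = t then (1 : Int) else 0) > 0) ↔
      ∃ k : Nat, k < sq.length ∧ k ≠ i ∧ k ≠ j ∧ sq.getD k 0 = t := by
  have hsum := pvCount_eq_sum_range sq t
  have hi' : i ∈ Finset.range sq.length := Finset.mem_range.mpr hi
  have hj' : j ∈ (Finset.range sq.length).erase i :=
    Finset.mem_erase.mpr ⟨Ne.symm hij, Finset.mem_range.mpr hj⟩
  rw [← Finset.add_sum_erase _ _ hi', ← Finset.add_sum_erase _ _ hj'] at hsum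
  have hRpos : (0 < ∑ k ∈ ((Finset.range sq.length).erase i).erase j,
      (if sq.getD k 0 = t then 1 else 0)) ↔
      ∃ k : Nat, k < sq.length ∧ k ≠ i ∧ k ≠ j ∧ sq.getD k 0 = t := by
    rw [Nat.pos_iff_ne_zero, Ne, Finset.sum_eq_zero_iff]
    push Not
    constructor
    · rintro ⟨k, hk, hne⟩
      rw [Finset.mem_erase, Finset.mem_erase, Finset.mem_range] at hk
      refine ⟨k, hk.2.2, hk.2.1, hk.1, ?_⟩
      by_contra h; rw [if_neg h] at hne; exact hne rfl
    · rintro ⟨k, hk, hki, hkj, hval⟩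
      refine ⟨k, by simp [Finset.mem_erase, Finset.mem_range, hk, hki, hkj], ?_⟩
      rw [if_pos hval]; exact one_ne_zero
  rw [hsum, ← hRpos]
  simp

theorem pvB_iff (xs : List Int) :
    contains_pythagorean_triplet_alt xs = true ↔ pvHasTriple xs := by
  have hsq : ∀ m : Nat, m < xs.length →
      (xs.map (fun x => x * x)).getD m 0 = xs.getD m 0 * xs.getD m 0 := by
    intro m hm
    rw [List.getD_eq_getElem _ _ (by simpa using hm), List.getElem_map,
      List.getD_eq_getElem _ _ hm]
  have hlen : (xs.map (fun x => x * x)).length = xs.length := List.length_map ..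
  unfold contains_pythagorean_triplet_alt
  rw [pvOuterLoop_any, List.any_eq_true]
  constructor
  · rintro ⟨iI, hiI, hinner⟩
    rw [pvInnerLoop_any, List.any_eq_true] at hinner
    obtain ⟨jI, hjI, hcond⟩ := hinner
    rw [PySem.List.mem_pyRange_one] at hiI hjI
    simp only [decide_eq_true_eq] at hcond
    have h0i : 0 ≤ iI := hiI.1
    have h0j : 0 ≤ jI := by omega
    rw [PySem.List.pyGetD_of_nonneg _ _ h0i, PySem.List.pyGetD_of_nonneg _ _ h0j,
      pvCounter_getD] at hcond
    have hiN : iI.toNat < xs.length := by omega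
    have hjN : jI.toNat < xs.length := by omega
    have hne : iI.toNat ≠ jI.toNat := by omega
    simp only [beq_iff_eq] at hcond
    rw [pvSpare_iff _ _ _ _ (by omega) (by omega) hne] at hcond
    obtain ⟨k, hk, hki, hkj, hkv⟩ := hcond
    rw [hlen] at hk
    refine ⟨iI.toNat, jI.toNat, k, hiN, hjN, hk, hne, Ne.symm hki, Ne.symm hkj, ?_⟩
    rw [hsq _ hiN, hsq _ hjN] at hkv
    rw [hsq _ hk] at hkv
    rw [pow_two, pow_two, pow_two, hkv]
  · rintro ⟨i, j, k, hi, hj, hk, hij, hik, hjk, heq⟩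
    rcases Nat.lt_or_ge i j with hlt | hge
    · refine ⟨(i : Int), ?_, ?_⟩
      · rw [PySem.List.mem_pyRange_one]; constructor <;> [positivity; exact_mod_cast hi]
      · rw [pvInnerLoop_any, List.any_eq_true]
        refine ⟨(j : Int), by rw [PySem.List.mem_pyRange_one]; omega, ?_⟩
        simp only [decide_eq_true_eq]
        rw [PySem.List.pyGetD_of_nonneg _ _ (by positivity),
          PySem.List.pyGetD_of_nonneg _ _ (by positivity), pvCounter_getD,
          Int.toNat_natCast, Int.toNat_natCast]
        simp only [beq_iff_eq]
        rw [pvSpare_iff _ _ i j (by omega) (by omega) hij]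
        refine ⟨k, by omega, Ne.symm hik, Ne.symm hjk, ?_⟩
        rw [hsq _ hi, hsq _ hj, hsq _ hk]
        rw [pow_two, pow_two, pow_two] at heq
        omega
    · have hji : j < i := by omega
      refine ⟨(j : Int), ?_, ?_⟩
      · rw [PySem.List.mem_pyRange_one]; constructor <;> [positivity; exact_mod_cast hj]
      · rw [pvInnerLoop_any, List.any_eq_true]
        refine ⟨(i : Int), by rw [PySem.List.mem_pyRange_one]; omega, ?_⟩
        simp only [decide_eq_true_eq]
        rw [PySem.List.pyGetD_of_nonneg _ _ (by positivity),
          PySem.List.pyGetD_of_nonneg _ _ (by positivity), pvCounter_getD,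
          Int.toNat_natCast, Int.toNat_natCast]
        simp only [beq_iff_eq]
        rw [pvSpare_iff _ _ j i (by omega) (by omega) (Ne.symm hij)]
        refine ⟨k, by omega, Ne.symm hjk, Ne.symm hik, ?_⟩
        rw [hsq _ hi, hsq _ hj, hsq _ hk]
        rw [pow_two, pow_two, pow_two] at heq
        omega

-- ===== VERDICT (by name: the statement is the Claim_ definition above) =====
theorem contains_pythagorean_triplet_spec : Claim_equal_contains_pythagorean_triplet := by
  intro arr _
  unfold Spec_contains_pythagorean_triplet
  rw [Bool.eq_iff_iff, pvA_iff, pvB_iff]
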